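-- pv_equiv track=rewrite | github.com/minchoi0109/tutorial | 0801q1dict.py | mostcommonname
-- ===== SOURCE A (Python) =====
-- def mostcommonname(l):
--     dictionary = dict()
--     new = set()
--     count = 0
--     item = ""
--     if len(l) == 0:
--         return False
--     else:
--         for x in l:
--             if dictionary.get(x, 0) == 0:
--                 dictionary[x] = 1
--             elif dictionary.get(x, 0) != 0:
--                 dictionary[x] = dictionary[x] + 1
--         for y in dictionary:
--             if dictionary[y] > count:
--                 count = dictionary[y]
--                 item = y
--         for z in dictionary:
--             if dictionary[z] == count:
--                 new.add(z)
--
--         return new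
-- ===== SOURCE B (Python) =====
-- def mostcommonname(l):
--     if len(l) == 0:
--         return False
--     counts = {}
--     for x in l:
--         counts[x] = counts.get(x, 0) + 1
--     index = {}
--     for name, c in counts.items():
--         index.setdefault(c, []).append(name)
--     return set(index[max(index)])
-- ===== Notes on version B (the rewrite author's own statement) =====
-- stated objective: alternative
-- what changed: B counts occurrences in one dict pass, then builds an inverted index mapping each frequency to its names and returns the bucket of the maximum frequency, replacing A's separate running-max scan and filtering scan over the counts.
-- outside the precondition, e.g. on mostcommonname([]): A returns False, B returns False
import Mathlib
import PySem

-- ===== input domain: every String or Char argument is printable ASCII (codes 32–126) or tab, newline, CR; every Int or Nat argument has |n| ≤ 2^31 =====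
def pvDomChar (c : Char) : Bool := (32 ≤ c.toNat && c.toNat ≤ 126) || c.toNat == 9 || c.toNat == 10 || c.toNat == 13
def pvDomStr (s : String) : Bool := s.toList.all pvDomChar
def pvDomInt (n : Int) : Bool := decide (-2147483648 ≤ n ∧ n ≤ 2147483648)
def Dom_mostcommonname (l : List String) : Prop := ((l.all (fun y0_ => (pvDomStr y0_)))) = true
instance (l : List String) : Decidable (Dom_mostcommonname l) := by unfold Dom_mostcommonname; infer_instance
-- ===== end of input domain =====

-- B replaces A's running-max scan + filtering scan by an inverted index (frequency -> names) looked up at the maximum frequency (alternative decomposition, same cost).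


-- ===== PORT A =====
-- Dict lookups dictionary[y]/dictionary[z] are ported as getD _ 0; exact here since y, z range over the dict's keys.
def mostcommonname (l : List String) : List String :=
  if l.length == 0 then []   -- Python returns False (a bool, not a set) here; excluded by Pre_
  else
    let dictionary := l.foldl (fun d x =>
      if d.getD x 0 == 0 then d.insert x 1
      else if d.getD x 0 != 0 then d.insert x (d.getD x 0 + 1)
      else d) (PySem.Dict.empty)
    let ci := dictionary.keys.foldl (fun (p : Int × String) y =>
      if dictionary.getD y 0 > p.1 then (dictionary.getD y 0, y) else p) (0, "")
    dictionary.keys.foldl (fun (s : PySem.Set String) z =>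
      if dictionary.getD z 0 == ci.1 then PySem.Set.add s z else s) PySem.Set.empty

-- ===== PORT B =====
-- index[max(index)] is ported as getD at max? of the keys; exact: the key max(index) is present, and l ≠ [] makes the keys nonempty.
def mostcommonname_alt (l : List String) : List String :=
  if l.length == 0 then []   -- Python returns False here; excluded by Pre_
  else
    let counts := l.foldl (fun d x => d.insert x (d.getD x 0 + 1)) (PySem.Dict.empty)
    let index := counts.items.foldl
      (fun (ix : PySem.Dict Int (List String)) p => ix.modify p.2 [] (· ++ [p.1]))
      PySem.Dict.empty
    match PySem.List.max? index.keys (fun k => k) with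
    | some m => PySem.Set.ofList (index.getD m [])
    | none => []

-- ===== PRECONDITION & SPEC =====
-- Pre_ excludes only the empty list, on which A returns the boolean False instead of a set.
def Pre_mostcommonname (l : List String) : Prop := l ≠ []
instance (l : List String) : Decidable (Pre_mostcommonname l) := by unfold Pre_mostcommonname; infer_instance
def pvWitness_mostcommonname : List String := ["ann", "bob", "ann"]

def Spec_mostcommonname (l : List String) (out : List String) : Prop := out = mostcommonname_alt l
instance (l : List String) (out : List String) : Decidable (Spec_mostcommonname l out) := by unfold Spec_mostcommonname; infer_instance

-- ===== CLAIM (what is proved, stated in full; the proofs are below) =====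
def Claim_equal_mostcommonname : Prop := ∀ (l : List String), Dom_mostcommonname l → Pre_mostcommonname l → Spec_mostcommonname l (mostcommonname l)

-- ===== LEMMAS AND PROOFS =====

-- A's counting loop is exactly the counter loop: when the branch test 'getD x 0 == 0' holds, insert x 1 = insert x (getD x 0 + 1).
theorem count_fold_step (l : List String) : ∀ (d : PySem.Dict String Int),
    l.foldl (fun d x =>
      if d.getD x 0 == 0 then d.insert x 1
      else if d.getD x 0 != 0 then d.insert x (d.getD x 0 + 1)
      else d) d
    = l.foldl (fun d x => d.insert x (d.getD x 0 + 1)) d := by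
  induction l with
  | nil => intro d; rfl
  | cons x t ih =>
    intro d
    simp only [List.foldl_cons]
    rw [show (if d.getD x 0 == 0 then d.insert x 1
        else if d.getD x 0 != 0 then d.insert x (d.getD x 0 + 1) else d)
        = d.insert x (d.getD x 0 + 1) by by_cases h : d.getD x 0 = 0 <;> simp [h]]
    exact ih _

theorem count_fold_eq_counter (l : List String) :
    l.foldl (fun d x =>
      if d.getD x 0 == 0 then d.insert x 1
      else if d.getD x 0 != 0 then d.insert x (d.getD x 0 + 1)
      else d) (PySem.Dict.empty) = PySem.Dict.counter l := by
  rw [count_fold_step, PySem.Dict.foldl_insert_getD_add_one_eq_counter]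

-- the first component of A's running-max pair fold is a fold of max over the projected values
theorem fst_pair_fold (g : String → Int) (ys : List String) (p : Int × String) :
    (ys.foldl (fun p y => if g y > p.1 then (g y, y) else p) p).1
      = (ys.map g).foldl max p.1 := by
  induction ys generalizing p with
  | nil => rfl
  | cons y t ih =>
    simp only [List.foldl_cons, List.map_cons]
    rw [ih]
    by_cases h : g y > p.1
    · simp [h, max_eq_right (le_of_lt h)]
    · simp [h, max_eq_left (le_of_not_gt h)]

-- A's conditional Set.add loop from a Nodup source is the filter
theorem set_fold_eq_filter (p : String → Bool) (zs : List String) (s0 : List String)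
    (hnd : zs.Nodup) (hdisj : ∀ z ∈ zs, z ∉ s0) :
    zs.foldl (fun (s : PySem.Set String) z => if p z then PySem.Set.add s z else s) s0
      = s0 ++ zs.filter p := by
  induction zs generalizing s0 with
  | nil => simp
  | cons z t ih =>
    simp only [List.foldl_cons, List.filter_cons]
    have hz : z ∉ s0 := hdisj z (List.mem_cons_self)
    have hnd' : t.Nodup := hnd.of_cons
    cases hpz : p z with
    | true =>
      simp only [if_true]
      rw [PySem.Set.add_of_not_mem hz,
        ih (s0 ++ [z]) hnd' (by
          intro w hw hmem
          rcases List.mem_append.mp hmem with h1 | h1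
          · exact hdisj w (List.mem_cons_of_mem _ hw) h1
          · rcases List.mem_singleton.mp h1 with rfl
            exact (List.nodup_cons.mp hnd).1 hw)]
      rw [List.append_assoc]
      rfl
    | false =>
      simp only [Bool.false_eq_true, if_false]
      rw [ih s0 hnd' (fun w hw => hdisj w (List.mem_cons_of_mem _ hw))]

theorem mostcommonname_spec_aux (l : List String) (hne : l ≠ []) :
    mostcommonname l = mostcommonname_alt l := by
  have hlen : (l.length == 0) = false := by
    simp [List.length_eq_zero_iff, hne]
  unfold mostcommonname mostcommonname_alt
  rw [hlen]
  simp only [Bool.false_eq_true, if_false]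
  rw [count_fold_eq_counter, PySem.Dict.foldl_insert_getD_add_one_eq_counter]
  simp only [PySem.Dict.getD_counter, PySem.Dict.keys_counter, PySem.Dict.items_counter]
  -- B's index loop over (name, count) pairs, re-read as the standard (key, value)-pair modify loop
  have hfold :
      List.foldl (fun (ix : PySem.Dict Int (List String)) p => ix.modify p.2 [] fun x => x ++ [p.1])
          PySem.Dict.empty (List.map (fun k => (k, ((List.count k l : Int)))) (PySem.Set.ofList l))
        = List.foldl (fun d q => d.modify q.1 [] fun x => x ++ [q.2]) PySem.Dict.empty
          (List.map (fun k => (((List.count k l : Int)), k)) (PySem.Set.ofList l)) := by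
    rw [List.foldl_map, List.foldl_map]
  rw [hfold]
  have hkeys : (List.foldl (fun (d : PySem.Dict Int (List String)) q => d.modify q.1 [] fun x => x ++ [q.2])
          PySem.Dict.empty (List.map (fun k => (((List.count k l : Int)), k)) (PySem.Set.ofList l))).keys
      = PySem.Set.ofList (List.map (fun k => ((List.count k l : Int))) (PySem.Set.ofList l)) := by
    rw [PySem.Dict.keys_foldl_modify_key]
    simp [PySem.Set.update_nil_left, List.map_map, Function.comp_def]
  rw [hkeys]
  rw [fst_pair_fold (fun y => ((List.count y l : Int))) (PySem.Set.ofList l) (0, "")]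
  set vals : List Int := List.map (fun k => ((List.count k l : Int))) (PySem.Set.ofList l) with hvals
  set M : Int := List.foldl max 0 vals with hM
  obtain ⟨x, hx⟩ := List.exists_mem_of_ne_nil l hne
  have hxS : x ∈ PySem.Set.ofList l := (PySem.Set.mem_ofList l x).mpr hx
  have hxv : ((List.count x l : Int)) ∈ vals := by rw [hvals]; exact List.mem_map_of_mem hxS
  have hub := PySem.List.le_foldl_max vals 0
  have h1 : (1 : Int) ≤ (List.count x l : Int) := by
    exact_mod_cast List.count_pos_iff.mpr hx
  have hMpos : (1 : Int) ≤ M := le_trans h1 (hub.2 _ hxv)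
  have hMmem : M ∈ vals := by
    rcases PySem.List.foldl_max_mem vals 0 with h | h
    · rw [hM, h] at hMpos; exact absurd hMpos (by norm_num)
    · exact h
  cases hm : PySem.List.max? (PySem.Set.ofList vals) (fun k => k) with
  | none =>
    exact absurd ((PySem.List.max?_eq_none_iff _ _).mp hm)
      (List.ne_nil_of_mem ((PySem.Set.mem_ofList vals M).mpr hMmem))
  | some m =>
    have hmle : m ≤ M := hub.2 _ ((PySem.Set.mem_ofList vals m).mp (PySem.List.max?_mem hm))
    have hlem : M ≤ m := PySem.List.max?_isMax hm M ((PySem.Set.mem_ofList vals M).mpr hMmem)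
    have hmM : m = M := le_antisymm hmle hlem
    simp only []
    have hbucket : (List.foldl (fun (d : PySem.Dict Int (List String)) q => d.modify q.1 [] fun x => x ++ [q.2])
            PySem.Dict.empty (List.map (fun k => (((List.count k l : Int)), k)) (PySem.Set.ofList l))).getD m []
        = List.filter (fun k => ((List.count k l : Int)) == m) (PySem.Set.ofList l) := by
      rw [PySem.Dict.getD_foldl_modify_append]
      simp [List.filter_map, Function.comp_def]
    rw [hbucket, hmM]
    rw [set_fold_eq_filter (fun z => ((List.count z l : Int) == M)) (PySem.Set.ofList l)
      PySem.Set.empty (PySem.Set.nodup_ofList l) (by intro z _ h; exact absurd h (List.not_mem_nil))]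
    rw [PySem.Set.ofList_eq_self_of_nodup _ (List.Nodup.filter _ (PySem.Set.nodup_ofList l))]
    rfl
-- ===== VERDICT (by name: the statement is the Claim_ definition above) =====
theorem mostcommonname_spec : Claim_equal_mostcommonname := by
  intro l _ hpre
  exact mostcommonname_spec_aux l hpre
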